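-- pv_equiv track=rewrite | github.com/zlojic/casino | solution_optimized.py | solution
-- ===== SOURCE A (Python) =====
-- def solution(N, K):
--     if K == 0 or N <= 2:
--         return N - 1
--
--     if N % 2 == 0:
--         round = 1 + solution(N // 2, K - 1)
--     else:
--         round = 1 + solution(N - 1, K)
--
--     return round
-- ===== SOURCE B (Python) =====
-- def solution(N, K):
--     count = 0
--     while not (K == 0 or N <= 2):
--         if N % 2 == 0:
--             N //= 2
--             K -= 1
--         else:
--             N -= 1
--         count += 1
--     return count + N - 1
-- ===== Notes on version B (the rewrite author's own statement) =====
-- stated objective: alternative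
-- what changed: Replaced the non-tail recursion (each call adding 1 to a recursive result) by an iterative while loop threading an explicit step counter and returning count + N - 1 at the end.
import Mathlib
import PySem

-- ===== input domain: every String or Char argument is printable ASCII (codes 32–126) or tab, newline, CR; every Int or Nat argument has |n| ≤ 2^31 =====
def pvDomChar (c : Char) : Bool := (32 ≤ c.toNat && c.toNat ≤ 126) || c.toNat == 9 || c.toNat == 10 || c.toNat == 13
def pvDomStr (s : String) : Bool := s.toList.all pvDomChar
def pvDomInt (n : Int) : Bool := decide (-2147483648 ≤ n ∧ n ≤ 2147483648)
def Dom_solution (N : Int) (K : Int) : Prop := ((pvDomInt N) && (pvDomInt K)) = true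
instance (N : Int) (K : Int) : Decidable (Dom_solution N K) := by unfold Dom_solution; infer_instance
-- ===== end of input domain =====

-- B rewrites A's recursion as an iterative loop with an explicit step counter (alternative decomposition, same cost).

-- ===== PORT A =====
def solution (N : Int) (K : Int) : Int :=
  if K = 0 ∨ N ≤ 2 then N - 1
  else if PySem.Int.mod N 2 = 0 then 1 + solution (PySem.Int.floordiv N 2) (K - 1)
  else 1 + solution (N - 1) K
termination_by N.toNat
decreasing_by
  · rw [PySem.Int.floordiv_eq_ediv_of_pos (by omega)]; omega
  · omega

-- ===== PORT B =====
-- the while loop of Source B: state (N, K, count), returns final (N, count)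
def solutionLoop (N : Int) (K : Int) (count : Int) : Int × Int :=
  if ¬ (K = 0 ∨ N ≤ 2) then
    if PySem.Int.mod N 2 = 0 then solutionLoop (PySem.Int.floordiv N 2) (K - 1) (count + 1)
    else solutionLoop (N - 1) K (count + 1)
  else (N, count)
termination_by N.toNat
decreasing_by
  · rw [PySem.Int.floordiv_eq_ediv_of_pos (by omega)]; omega
  · omega

def solution_alt (N : Int) (K : Int) : Int :=
  let r := solutionLoop N K 0
  r.2 + r.1 - 1

-- ===== PRECONDITION & SPEC =====
def Spec_solution (N : Int) (K : Int) (out : Int) : Prop := out = solution_alt N K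
instance (N : Int) (K : Int) (out : Int) : Decidable (Spec_solution N K out) := by unfold Spec_solution; infer_instance

-- ===== CLAIM (what is proved, stated in full; the proofs are below) =====
def Claim_equal_solution : Prop := ∀ (N : Int) (K : Int), Dom_solution N K → Spec_solution N K (solution N K)

-- ===== LEMMAS AND PROOFS =====
theorem solutionLoop_invariant (N K count : Int) :
    (solutionLoop N K count).2 + (solutionLoop N K count).1 - 1 = count + solution N K := by
  induction N, K, count using solutionLoop.induct with
  | case1 N K count hg hm ih =>
    rw [solutionLoop, solution]
    rw [if_pos hg, if_neg hg, if_pos hm]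
    omega
  | case2 N K count hg hm ih =>
    rw [solutionLoop, solution]
    rw [if_pos hg, if_neg hg, if_neg hm]
    omega
  | case3 N K count hg =>
    rw [solutionLoop, solution]
    rw [if_neg hg]
    by_cases h : K = 0 ∨ N ≤ 2
    · rw [if_pos h]; ring
    · exact absurd h hg

-- ===== VERDICT (by name: the statement is the Claim_ definition above) =====
theorem solution_spec : Claim_equal_solution := by
  intro N K _
  have := solutionLoop_invariant N K 0
  show solution N K = (solutionLoop N K 0).2 + (solutionLoop N K 0).1 - 1
  omega
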